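-- pv_equiv track=rewrite | github.com/ContextLab/dream-stream | scripts/generate_audio.py | split_by_pauses
-- ===== SOURCE A (Python) =====
-- def split_by_pauses(content: str) -> list[dict]:
--     parts = content.split("[PAUSE]")
--     segments = []
--
--     for i, part in enumerate(parts):
--         text = part.strip()
--         if text:
--             segments.append({"type": "narration", "text": text})
--         if i < len(parts) - 1:
--             segments.append({"type": "pause"})
--
--     return segments
-- ===== SOURCE B (Python) =====
-- def split_by_pauses(content: str) -> list[dict]:
--     # Structural recursion on the list of parts: the head becomes a narration
--     # segment (if nonempty after strip); a nonempty tail means a pause marker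
--     # followed by the segments of the rest.  No index arithmetic.
--     def go(parts):
--         segs = []
--         text = parts[0].strip()
--         if text:
--             segs.append({"type": "narration", "text": text})
--         if len(parts) > 1:
--             segs.append({"type": "pause"})
--             segs.extend(go(parts[1:]))
--         return segs
--     return go(content.split("[PAUSE]"))
-- ===== Notes on version B (the rewrite author's own statement) =====
-- stated objective: alternative
-- what changed: Replaces the enumerate loop with its i < len(parts)-1 index arithmetic by a structural recursion on the parts list: head becomes a narration segment, a nonempty tail means a pause followed by the recursion on the rest.
import Mathlib
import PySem

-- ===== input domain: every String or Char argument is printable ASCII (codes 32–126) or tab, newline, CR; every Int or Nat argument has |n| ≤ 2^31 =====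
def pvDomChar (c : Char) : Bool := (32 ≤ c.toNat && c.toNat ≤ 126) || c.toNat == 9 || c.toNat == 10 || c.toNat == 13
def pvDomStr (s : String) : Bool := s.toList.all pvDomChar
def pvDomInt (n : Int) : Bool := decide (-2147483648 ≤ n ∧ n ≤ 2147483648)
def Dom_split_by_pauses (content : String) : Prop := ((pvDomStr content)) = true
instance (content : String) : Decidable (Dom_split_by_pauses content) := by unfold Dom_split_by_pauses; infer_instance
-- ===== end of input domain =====

-- B replaces A's enumerate loop and its i < len(parts)-1 index test by a structural
-- recursion on the parts list (objective: alternative decomposition, same cost).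

-- ===== PORT A =====
def split_by_pauses (content : String) : List (List (String × String)) :=
  let parts := (PySem.Str.split? content "[PAUSE]").getD []   -- sep ≠ "", so split? is always some
  (PySem.List.enumerate parts).foldl (fun segments ip =>
    let text := PySem.Str.strip ip.2
    let segments :=
      if text ≠ "" then segments ++ [[("type", "narration"), ("text", text)]] else segments
    if ip.1 < (parts.length : Int) - 1 then segments ++ [[("type", "pause")]] else segments) []

-- ===== PORT B =====
-- B's inner helper go(parts); the [] case is unreachable (str.split never returns [])
def pvGoB : List String → List (List (String × String))
  | [] => []
  | p :: rest =>
    let text := PySem.Str.strip p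
    let segs := if text ≠ "" then [[("type", "narration"), ("text", text)]] else []
    match rest with
    | [] => segs
    | _ :: _ => (segs ++ [[("type", "pause")]]) ++ pvGoB rest

def split_by_pauses_alt (content : String) : List (List (String × String)) :=
  pvGoB ((PySem.Str.split? content "[PAUSE]").getD [])

-- ===== PRECONDITION & SPEC =====
def Spec_split_by_pauses (content : String) (out : List (List (String × String))) : Prop := out = split_by_pauses_alt content
instance (content : String) (out : List (List (String × String))) : Decidable (Spec_split_by_pauses content out) := by unfold Spec_split_by_pauses; infer_instance

-- ===== CLAIM (what is proved, stated in full; the proofs are below) =====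
def Claim_equal_split_by_pauses : Prop := ∀ (content : String), Dom_split_by_pauses content → Spec_split_by_pauses content (split_by_pauses content)

-- ===== LEMMAS AND PROOFS =====

-- A's loop body, with the length of the full parts list abstracted as n
def pvBodyA (n : Int) (segments : List (List (String × String))) (ip : Int × String) :
    List (List (String × String)) :=
  let text := PySem.Str.strip ip.2
  let segments :=
    if text ≠ "" then segments ++ [[("type", "narration"), ("text", text)]] else segments
  if ip.1 < n - 1 then segments ++ [[("type", "pause")]] else segments

-- The loop over the enumerated suffix, started at index s with s + |l| = n, appends pvGoB l
theorem pvFoldA_eq_goB (l : List String) (s : Int) (n : Int) (acc : List (List (String × String)))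
    (h : s + l.length = n) :
    (PySem.List.enumerate l s).foldl (pvBodyA n) acc = acc ++ pvGoB l := by
  induction l generalizing s acc with
  | nil => simp [PySem.List.enumerate_nil, pvGoB]
  | cons p rest ih =>
    rw [PySem.List.enumerate_cons, List.foldl_cons]
    rw [ih (s + 1) _ (by simp at h ⊢; omega)]
    cases rest with
    | nil =>
      simp only [List.length_cons, List.length_nil] at h
      have hs : ¬ s < n - 1 := by omega
      simp only [pvBodyA, pvGoB, hs, if_false]
      split <;> simp
    | cons q rs =>
      have hs : s < n - 1 := by simp at h; omega
      simp only [pvBodyA, pvGoB, hs, if_true]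
      split <;> simp

-- ===== VERDICT (by name: the statement is the Claim_ definition above) =====
theorem split_by_pauses_spec : Claim_equal_split_by_pauses := by
  intro content _
  unfold Spec_split_by_pauses split_by_pauses split_by_pauses_alt
  exact pvFoldA_eq_goB ((PySem.Str.split? content "[PAUSE]").getD []) 0
    (((PySem.Str.split? content "[PAUSE]").getD []).length : Int) [] (by simp)
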